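-- pv_equiv track=rewrite | github.com/fratucci12/rag | rag_app/chunking.py | _build_page_index
-- ===== SOURCE A (Python) =====
-- from typing import List, Dict, Any
--
-- def _build_page_index(pages: List[str]):
--     spans = []
--     pos = 0
--     for i, p in enumerate(pages, start=1):
--         s = p or ""
--         spans.append((pos, pos + len(s), i))
--         pos += len(s) + 1
--     return spans
-- ===== SOURCE B (Python) =====
-- from itertools import accumulate
-- from typing import List
--
-- def _build_page_index(pages: List[str]):
--     L = [len(p or "") for p in pages]
--     starts = list(accumulate((n + 1 for n in L[:-1]), initial=0))
--     return [(s, s + n, i) for i, (s, n) in enumerate(zip(starts, L), start=1)]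
-- ===== Notes on version B (the rewrite author's own statement) =====
-- stated objective: alternative
-- what changed: B precomputes the start-offset prefix table with itertools.accumulate and assembles the spans in a separate zip/enumerate pass, instead of threading a mutable pos accumulator through one loop.
import Mathlib
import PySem

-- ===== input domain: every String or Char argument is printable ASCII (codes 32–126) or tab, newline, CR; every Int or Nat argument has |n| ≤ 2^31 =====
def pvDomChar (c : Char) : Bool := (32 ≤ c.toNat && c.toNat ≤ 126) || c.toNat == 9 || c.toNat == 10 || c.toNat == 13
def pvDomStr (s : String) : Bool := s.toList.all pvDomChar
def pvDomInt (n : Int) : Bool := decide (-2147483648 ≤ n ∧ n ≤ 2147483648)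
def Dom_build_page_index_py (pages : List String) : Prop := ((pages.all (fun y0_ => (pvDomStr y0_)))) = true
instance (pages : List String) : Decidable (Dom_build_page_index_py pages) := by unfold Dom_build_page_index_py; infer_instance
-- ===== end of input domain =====

-- B computes the start offsets as a prefix table (accumulate) and assembles spans by zipping,
-- instead of threading a mutable position through one loop. Objective: alternative decomposition.

-- ===== PORT A =====
-- loop: for i, p in enumerate(pages, 1): append (pos, pos+len, i); pos += len+1
def pvGoA (i pos : Int) : List String → List (Int × Int × Int)
  | [] => []
  | p :: rest =>
      (pos, pos + (PySem.Str.len p : Int), i) :: pvGoA (i + 1) (pos + (PySem.Str.len p : Int) + 1) rest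

def build_page_index_py (pages : List String) : List (Int × Int × Int) :=
  pvGoA 1 0 pages

-- ===== PORT B =====
def build_page_index_py_alt (pages : List String) : List (Int × Int × Int) :=
  let L : List Int := pages.map (fun p => (PySem.Str.len p : Int))
  let starts : List Int := (L.dropLast.map (fun n => n + 1)).scanl (fun a b => a + b) 0
  ((starts.zip L).zipIdx).map (fun x => (x.1.1, x.1.1 + x.1.2, (x.2 : Int) + 1))

-- ===== PRECONDITION & SPEC =====
def Spec_build_page_index_py (pages : List String) (out : List (Int × Int × Int)) : Prop := out = build_page_index_py_alt pages
instance (pages : List String) (out : List (Int × Int × Int)) : Decidable (Spec_build_page_index_py pages out) := by unfold Spec_build_page_index_py; infer_instance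

-- ===== CLAIM (what is proved, stated in full; the proofs are below) =====
def Claim_equal_build_page_index_py : Prop := ∀ (pages : List String), Dom_build_page_index_py pages → Spec_build_page_index_py pages (build_page_index_py pages)

-- ===== LEMMAS AND PROOFS =====

lemma pvB_assemble (pages : List String) (pos : Int) (k : Nat) :
    ((((((pages.map (fun p => (PySem.Str.len p : Int))).dropLast.map (fun n => n + 1)).scanl
        (fun a b => a + b) pos).zip (pages.map (fun p => (PySem.Str.len p : Int)))).zipIdx k).map
      (fun x => (x.1.1, x.1.1 + x.1.2, (x.2 : Int) + 1)))
      = pvGoA ((k : Int) + 1) pos pages := by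
  induction pages generalizing pos k with
  | nil => simp [pvGoA]
  | cons p rest ih =>
      cases rest with
      | nil => simp [pvGoA, List.scanl]
      | cons q rs =>
          have hd : ((PySem.Str.len p : Int) :: (q :: rs).map (fun p => (PySem.Str.len p : Int))).dropLast
              = (PySem.Str.len p : Int) :: ((q :: rs).map (fun p => (PySem.Str.len p : Int))).dropLast := by
            simp [List.dropLast_cons_of_ne_nil]
          have ih' := ih (pos + ((PySem.Str.len p : Int) + 1)) (k + 1)
          conv_rhs => rw [pvGoA]
          simp only [List.map_cons] at hd ⊢
          rw [hd]
          simp only [List.map_cons, List.scanl_cons, List.zip_cons_cons, List.zipIdx_cons, List.map_cons]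
          refine List.cons_eq_cons.mpr ⟨rfl, ?_⟩
          simp only [List.map_cons] at ih'
          rw [ih']
          push_cast
          ring_nf

-- ===== VERDICT (by name: the statement is the Claim_ definition above) =====
theorem build_page_index_py_spec : Claim_equal_build_page_index_py := by
  intro pages _
  unfold Spec_build_page_index_py build_page_index_py build_page_index_py_alt
  simpa using (pvB_assemble pages 0 0).symm
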